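-- pv_equiv track=rewrite | github.com/jerath/pokerhands | generate.py | generalize
-- ===== SOURCE A (Python) =====
-- def generalize( hands ):
--     generalized_rules = {}
--
--     #For each classification option for hands
--     for key in hands:
--         #Prints number of hands of each class used in training
--         #print ('Hand : ' + key + ' Number: ' + str(len(hands[key])))
--
--         #Set the base rules to the rules of the first hand
--         rules = hands[key][0]
--
--         #For each hand of class 'key'
--         for hand in hands[key]:
--             #Duplicate the list of rules
--             new_rules = list(rules)
--             #Go through each rule
--             for rule in rules:
--                 #If the rule does not exist in the current hand, remove it from the list of rules.
--                 if rule not in hand: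
--                     new_rules.remove(rule)
--
--             rules = list(new_rules) #Update the list of rules.
--
--         generalized_rules[key] = rules #Add the rules to the generalized set after going through all the hands for that class.
--
--     return generalized_rules
-- ===== SOURCE B (Python) =====
-- def generalize(hands):
--     return {key: [rule for rule in hands[key][0]
--                   if all(rule in hand for hand in hands[key])]
--             for key in hands}
-- ===== Notes on version B (the rewrite author's own statement) =====
-- stated objective: simpler
-- what changed: Replaces A's outer loop over hands with progressive copy-and-remove narrowing of a mutable rule list by a single dict comprehension that keeps each rule of the first hand iff it is a member of every hand of the class.
import Mathlib
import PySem

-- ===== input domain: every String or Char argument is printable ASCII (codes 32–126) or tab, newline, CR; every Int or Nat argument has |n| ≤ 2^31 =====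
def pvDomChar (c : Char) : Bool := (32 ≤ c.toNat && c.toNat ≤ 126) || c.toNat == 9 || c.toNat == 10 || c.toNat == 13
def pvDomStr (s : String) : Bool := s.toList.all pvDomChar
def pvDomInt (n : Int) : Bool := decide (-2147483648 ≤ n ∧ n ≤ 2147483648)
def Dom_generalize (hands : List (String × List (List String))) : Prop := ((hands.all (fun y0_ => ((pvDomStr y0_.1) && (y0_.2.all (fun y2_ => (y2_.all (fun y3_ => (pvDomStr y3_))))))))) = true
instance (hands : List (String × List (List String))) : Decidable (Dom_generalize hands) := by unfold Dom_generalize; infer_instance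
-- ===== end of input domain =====

-- B replaces A's progressive copy-and-remove narrowing of the rule list with a single
-- filter of the first hand's rules by membership in every hand (objective: simpler).


-- ===== PORT A =====
-- inner loop body: 'if rule not in hand: new_rules.remove(rule)' (remove always succeeds
-- here since rule is still present; getD is only for totality)
def pvStepA (hand : List String) (nr : List String) (rule : String) : List String :=
  if !(hand.contains rule) then (PySem.List.remove? nr rule).getD nr else nr

def generalize (hands : List (String × List (List String))) : List (String × List String) :=
  hands.map (fun kv =>
    -- rules = hands[key][0]  (IndexError on an empty class is excluded by Pre_)
    let rules0 := (PySem.List.pyGet? kv.2 0).getD []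
    let rules := kv.2.foldl (fun rules hand => rules.foldl (pvStepA hand) rules) rules0
    (kv.1, rules))

-- ===== PORT B =====
def generalize_alt (hands : List (String × List (List String))) : List (String × List String) :=
  hands.map (fun kv =>
    (kv.1, ((PySem.List.pyGet? kv.2 0).getD []).filter
      (fun rule => kv.2.all (fun hand => hand.contains rule))))

-- ===== PRECONDITION & SPEC =====
-- Pre_ excludes exactly the inputs where A raises IndexError: a class with an empty list
-- of hands ('hands[key][0]').
def Pre_generalize (hands : List (String × List (List String))) : Prop :=
  (hands.all (fun kv => !kv.2.isEmpty)) = true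
instance (hands : List (String × List (List String))) : Decidable (Pre_generalize hands) := by unfold Pre_generalize; infer_instance
def pvWitness_generalize : (List (String × List (List String))) :=
  [("pair", [["low", "dup"], ["dup"]])]

def Spec_generalize (hands : List (String × List (List String))) (out : List (String × List String)) : Prop := out = generalize_alt hands
instance (hands : List (String × List (List String))) (out : List (String × List String)) : Decidable (Spec_generalize hands out) := by unfold Spec_generalize; infer_instance

-- ===== CLAIM (what is proved, stated in full; the proofs are below) =====
def Claim_equal_generalize : Prop := ∀ (hands : List (String × List (List String))), Dom_generalize hands → Pre_generalize hands → Spec_generalize hands (generalize hands)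

-- ===== LEMMAS AND PROOFS =====

-- the inner remove-loop is a filter: processing the remaining suffix l of the rule list,
-- with accumulator pre.filter p ++ l, yields (pre ++ l).filter p
theorem pvInner (hand : List String) (l : List String) :
    ∀ (pre : List String),
      l.foldl (pvStepA hand) (pre.filter (fun r => hand.contains r) ++ l)
        = (pre ++ l).filter (fun r => hand.contains r) := by
  induction l with
  | nil => intro pre; simp
  | cons rule t ih =>
    intro pre
    rw [List.foldl_cons]
    by_cases h : rule ∈ hand
    · have step : pvStepA hand (pre.filter (fun r => hand.contains r) ++ rule :: t) rule
          = (pre ++ [rule]).filter (fun r => hand.contains r) ++ t := by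
        simp [pvStepA, h, List.filter_append]
      rw [step, ih (pre ++ [rule])]
      simp [List.filter_append, h]
    · have hnotpre : rule ∉ pre.filter (fun r => hand.contains r) := by
        intro hx; exact h (by simpa using List.of_mem_filter hx)
      have hmem : rule ∈ pre.filter (fun r => hand.contains r) ++ rule :: t := by simp
      have step : pvStepA hand (pre.filter (fun r => hand.contains r) ++ rule :: t) rule
          = pre.filter (fun r => hand.contains r) ++ t := by
        have hc : (!(hand.contains rule)) = true := by simpa using h
        unfold pvStepA
        rw [if_pos hc, PySem.List.remove?_eq_some_erase _ rule hmem, Option.getD_some,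
          List.erase_append_right _ hnotpre, List.erase_cons_head]
      rw [step, ih pre]
      simp [List.filter_append, h]

-- one outer-loop step filters the current rules against the current hand
theorem pvInnerSelf (hand rules : List String) :
    rules.foldl (pvStepA hand) rules = rules.filter (fun r => hand.contains r) := by
  simpa using pvInner hand rules []

-- the outer loop over the hands filters the initial rules by membership in every hand
theorem pvOuter (hs : List (List String)) :
    ∀ (r : List String),
      hs.foldl (fun rules hand => rules.foldl (pvStepA hand) rules) r
        = r.filter (fun rule => hs.all (fun hand => hand.contains rule)) := by
  induction hs with
  | nil => intro r; simp
  | cons hand t ih =>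
    intro r
    rw [List.foldl_cons, pvInnerSelf, ih, List.filter_filter]
    simp [Bool.and_comm]

-- ===== VERDICT (by name: the statement is the Claim_ definition above) =====
theorem generalize_spec : Claim_equal_generalize := by
  intro hands _ _
  unfold Spec_generalize generalize generalize_alt
  refine List.map_congr_left ?_
  intro kv _
  simp only [pvOuter]
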